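-- pv_equiv track=rewrite | github.com/jinxianyap/prolog_revision | metarep_encoder/helper.py | generate_var_vals_declarations
-- ===== SOURCE A (Python) =====
-- RULE_ID_SYMBOL = 'rule_id'
--
-- VAR_VALS_END_SYMBOL = 'var_vals_end'
--
-- def generate_var_vals_declarations(symbols, arity):
--     if len(symbols) < arity or arity < 0: return []
--     ls = ['const({})'.format(VAR_VALS_END_SYMBOL)] if arity == 0 else []
--     for i in range(len(symbols)):
--         subs = generate_var_vals_declarations(symbols[i + 1:], arity-1)
--         for j in subs:
--             ls.append('var_vals(var_val(const({}), const({}), var(ground)), {})'.format(RULE_ID_SYMBOL, symbols[i], j))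
--     return ls
-- ===== SOURCE B (Python) =====
-- RULE_ID_SYMBOL = 'rule_id'
--
-- VAR_VALS_END_SYMBOL = 'var_vals_end'
--
-- def _combos(symbols, r):
--     if len(symbols) < r:
--         return []
--     if r == 0:
--         return [[]]
--     rest = symbols[1:]
--     return [[symbols[0]] + c for c in _combos(rest, r - 1)] + _combos(rest, r)
--
-- def generate_var_vals_declarations(symbols, arity):
--     if arity < 0 or len(symbols) < arity:
--         return []
--     result = []
--     for combo in _combos(symbols, arity):
--         s = 'const({})'.format(VAR_VALS_END_SYMBOL)
--         for sym in reversed(combo):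
--             s = 'var_vals(var_val(const({}), const({}), var(ground)), {})'.format(RULE_ID_SYMBOL, sym, s)
--         result.append(s)
--     return result
-- ===== Notes on version B (the rewrite author's own statement) =====
-- stated objective: idiomatic
-- what changed: A's interleaved recursion (each level both picks a symbol and wraps the string) is split into a flat enumeration of the arity-combinations of symbols followed by a reverse fold that assembles each nested declaration string.
import Mathlib
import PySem

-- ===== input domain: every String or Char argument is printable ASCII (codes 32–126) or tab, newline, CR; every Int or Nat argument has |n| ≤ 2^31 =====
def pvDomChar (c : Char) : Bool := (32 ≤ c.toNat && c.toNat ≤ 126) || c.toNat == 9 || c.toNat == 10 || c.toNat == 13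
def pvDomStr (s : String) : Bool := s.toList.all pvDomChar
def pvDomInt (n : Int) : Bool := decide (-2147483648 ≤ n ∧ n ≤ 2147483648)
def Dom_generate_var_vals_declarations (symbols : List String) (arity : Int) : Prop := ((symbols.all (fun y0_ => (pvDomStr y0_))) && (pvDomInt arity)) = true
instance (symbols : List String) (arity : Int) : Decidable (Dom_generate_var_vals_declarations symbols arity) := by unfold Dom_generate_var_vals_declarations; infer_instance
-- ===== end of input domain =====

-- B replaces A's interleaved recursion by a flat enumeration of the combinations plus a
-- reverse fold assembling each nested string (objective: idiomatic decomposition, same cost).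

-- ===== PORT A =====
-- the shared format string 'var_vals(var_val(const({}), const({}), var(ground)), {})'
def pvFmt (sym j : String) : String :=
  "var_vals(var_val(const(rule_id), const(" ++ sym ++ "), var(ground)), " ++ j ++ ")"

mutual
-- the 'for i in range(len(symbols))' loop, iteration i holding symbols[i] and symbols[i+1:]
def generate_var_vals_declarations (symbols : List String) (arity : Int) : List String :=
  if (symbols.length : Int) < arity ∨ arity < 0 then []
  else (if arity = 0 then ["const(var_vals_end)"] else []) ++ pvGenLoop symbols arity
termination_by (symbols.length, 1)

def pvGenLoop : List String → Int → List String
  | [], _ => []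
  | x :: xs, arity =>
    (generate_var_vals_declarations xs (arity - 1)).map (fun j => pvFmt x j) ++ pvGenLoop xs arity
termination_by symbols _ => (symbols.length, 0)
end

-- ===== PORT B =====
-- Source B's _combos: the r-combinations of symbols, in itertools.combinations order
def pvCombos : List String → Nat → List (List String)
  | l, r =>
    if l.length < r then []
    else
      match r, l with
      | 0, _ => [[]]
      | _+1, [] => []
      | r+1, x :: rest => (pvCombos rest r).map (fun c => x :: c) ++ pvCombos rest (r+1)
termination_by l _ => l.length

-- Source B's _build: fold the combination in reverse, innermost symbol first
def pvBuild (combo : List String) : String :=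
  combo.reverse.foldl (fun s sym => pvFmt sym s) "const(var_vals_end)"

def generate_var_vals_declarations_alt (symbols : List String) (arity : Int) : List String :=
  if arity < 0 ∨ (symbols.length : Int) < arity then []
  else (pvCombos symbols arity.toNat).map pvBuild

-- ===== PRECONDITION & SPEC =====
def Spec_generate_var_vals_declarations (symbols : List String) (arity : Int) (out : List String) : Prop := out = generate_var_vals_declarations_alt symbols arity
instance (symbols : List String) (arity : Int) (out : List String) : Decidable (Spec_generate_var_vals_declarations symbols arity out) := by unfold Spec_generate_var_vals_declarations; infer_instance

-- ===== CLAIM (what is proved, stated in full; the proofs are below) =====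
def Claim_equal_generate_var_vals_declarations : Prop := ∀ (symbols : List String) (arity : Int), Dom_generate_var_vals_declarations symbols arity → Spec_generate_var_vals_declarations symbols arity (generate_var_vals_declarations symbols arity)

-- ===== LEMMAS AND PROOFS =====

theorem pvBuild_cons (x : String) (c : List String) :
    pvBuild (x :: c) = pvFmt x (pvBuild c) := by
  simp [pvBuild, List.foldl_append]

theorem pvCombos_nil (l : List String) (r : Nat) (h : l.length < r) :
    pvCombos l r = [] := by
  rw [pvCombos.eq_def]
  simp only []
  rw [if_pos h]

theorem pvGenLoop_zero (symbols : List String) (arity : Int) (h : arity ≤ 0) :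
    pvGenLoop symbols arity = [] := by
  induction symbols with
  | nil => simp [pvGenLoop]
  | cons x xs ih =>
    rw [pvGenLoop, generate_var_vals_declarations]
    have : arity - 1 < 0 := by omega
    simp [this, ih]

theorem pvGenLoop_eq (symbols : List String) (arity : Int) (h : 1 ≤ arity) :
    pvGenLoop symbols arity = (pvCombos symbols arity.toNat).map pvBuild := by
  induction symbols generalizing arity with
  | nil =>
    have : arity.toNat = (arity.toNat - 1) + 1 := by omega
    rw [this]
    simp [pvGenLoop, pvCombos]
  | cons x xs ih =>
    have hk : arity.toNat = (arity - 1).toNat + 1 := by omega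
    rw [pvGenLoop, hk, pvCombos]
    have hsub : generate_var_vals_declarations xs (arity - 1)
        = (pvCombos xs (arity - 1).toNat).map pvBuild := by
      by_cases h0 : arity - 1 = 0
      · rw [generate_var_vals_declarations]
        have hng : ¬ ((xs.length : Int) < arity - 1 ∨ arity - 1 < 0) := by omega
        rw [if_neg hng, if_pos h0, h0]
        simp [pvGenLoop_zero xs 0 le_rfl, pvCombos, pvBuild]
      · have h1 : 1 ≤ arity - 1 := by omega
        rw [generate_var_vals_declarations]
        by_cases hlen : (xs.length : Int) < arity - 1
        · rw [if_pos (Or.inl hlen), pvCombos_nil xs _ (by omega)]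
          simp
        · have hng : ¬ ((xs.length : Int) < arity - 1 ∨ arity - 1 < 0) := by omega
          rw [if_neg hng, if_neg h0, ih (arity - 1) h1]
          simp
    rw [hsub, ih arity h]
    by_cases hg : (x :: xs).length < (arity - 1).toNat.succ
    · have h1 : pvCombos xs (arity - 1).toNat = [] :=
        pvCombos_nil xs _ (by simp at hg; omega)
      have h2 : pvCombos xs arity.toNat = [] :=
        pvCombos_nil xs _ (by simp at hg; omega)
      rw [if_pos hg, h1, h2]
      simp
    · have hT2 : (arity - 1).toNat + 1 = arity.toNat := by omega
      rw [if_neg hg, hT2, List.map_append]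
      congr 1
      rw [List.map_map, List.map_map]
      exact List.map_congr_left (fun c _ => by simp [Function.comp, pvBuild_cons])

-- ===== VERDICT (by name: the statement is the Claim_ definition above) =====
theorem generate_var_vals_declarations_spec : Claim_equal_generate_var_vals_declarations := by
  intro symbols arity _
  unfold Spec_generate_var_vals_declarations
  rw [generate_var_vals_declarations, generate_var_vals_declarations_alt]
  by_cases hneg : arity < 0
  · simp [hneg]
  · by_cases hlen : (symbols.length : Int) < arity
    · simp [hneg, hlen]
    · have hguard : ¬ ((symbols.length : Int) < arity ∨ arity < 0) := by omega
      have hguard' : ¬ (arity < 0 ∨ (symbols.length : Int) < arity) := by omega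
      by_cases h0 : arity = 0
      · have hn : ¬ ((symbols.length : Int) < 0) := by omega
        simp [hn, h0, pvGenLoop_zero symbols 0 le_rfl, pvCombos, pvBuild]
      · simp [hguard, hguard', h0, pvGenLoop_eq symbols arity (by omega)]
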